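-- pv_equiv track=rewrite | github.com/dgunning/edgartools | edgar/documents/renderers/markdown.py | _identify_content_columns
-- ===== SOURCE A (Python) =====
-- from typing import List, Optional, Dict, Set
--
-- def _identify_content_columns(expanded_headers: List[List[str]],
--                              expanded_data_rows: List[List[str]]) -> List[int]:
--     """Identify which columns actually contain meaningful content."""
--     if not expanded_headers and not expanded_data_rows:
--         return []
--
--     # Get the column count
--     max_cols = 0
--     if expanded_headers:
--         max_cols = max(max_cols, max(len(row) for row in expanded_headers))
--     if expanded_data_rows:
--         max_cols = max(max_cols, max(len(row) for row in expanded_data_rows))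
--
--     content_columns = []
--
--     for col in range(max_cols):
--         has_content = False
--
--         # Check headers
--         for header_row in expanded_headers:
--             if col < len(header_row) and header_row[col].strip():
--                 has_content = True
--                 break
--
--         # Check data rows
--         if not has_content:
--             for data_row in expanded_data_rows:
--                 if col < len(data_row) and data_row[col].strip():
--                     has_content = True
--                     break
--
--         if has_content:
--             content_columns.append(col)
--
--     return content_columns
-- ===== SOURCE B (Python) =====
-- from typing import List
--
-- def _identify_content_columns(expanded_headers: List[List[str]],
--                              expanded_data_rows: List[List[str]]) -> List[int]:
--     """Identify which columns actually contain meaningful content."""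
--     content = set()
--     for row in expanded_headers:
--         for i, cell in enumerate(row):
--             if cell.strip():
--                 content.add(i)
--     for row in expanded_data_rows:
--         for i, cell in enumerate(row):
--             if cell.strip():
--                 content.add(i)
--     return sorted(content)
-- ===== Notes on version B (the rewrite author's own statement) =====
-- stated objective: simpler
-- what changed: Replaces the column-major scan (compute max_cols, then for each column re-scan every header and data row with early-exit breaks) by a single row-major pass that accumulates content column indices into a set and returns them sorted; max_cols is no longer computed.
import Mathlib
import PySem

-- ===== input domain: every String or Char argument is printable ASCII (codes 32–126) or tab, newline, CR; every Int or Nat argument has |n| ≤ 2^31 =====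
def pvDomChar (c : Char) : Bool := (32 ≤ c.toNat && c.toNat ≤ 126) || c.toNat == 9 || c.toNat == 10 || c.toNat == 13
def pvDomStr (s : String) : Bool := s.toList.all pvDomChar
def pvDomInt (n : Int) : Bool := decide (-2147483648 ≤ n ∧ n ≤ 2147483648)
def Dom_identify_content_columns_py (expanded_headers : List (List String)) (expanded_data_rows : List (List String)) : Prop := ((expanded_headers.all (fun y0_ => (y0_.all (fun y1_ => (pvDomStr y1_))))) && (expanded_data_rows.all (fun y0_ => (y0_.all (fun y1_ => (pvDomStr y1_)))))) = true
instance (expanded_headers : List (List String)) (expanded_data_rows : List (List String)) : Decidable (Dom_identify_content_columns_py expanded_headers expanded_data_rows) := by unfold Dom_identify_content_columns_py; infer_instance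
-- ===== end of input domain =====

-- B replaces A's column-major scan (max_cols, then per-column rescans of all rows with breaks) by one row-major pass accumulating content column indices into a set, sorted at the end (objective: simpler).

-- ===== PORT A =====
-- cell.strip() used as a truth value
def pvCellContent (s : String) : Bool := PySem.Str.strip s != ""

def identify_content_columns_py (expanded_headers : List (List String)) (expanded_data_rows : List (List String)) : List Int :=
  if expanded_headers = [] ∧ expanded_data_rows = [] then []
  else
    let max_cols : Int := 0
    let max_cols : Int :=
      if expanded_headers ≠ [] then
        max max_cols (((PySem.List.max? (expanded_headers.map (fun row => (row.length : Int))) (fun x => x)).getD 0))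
      else max_cols
    let max_cols : Int :=
      if expanded_data_rows ≠ [] then
        max max_cols (((PySem.List.max? (expanded_data_rows.map (fun row => (row.length : Int))) (fun x => x)).getD 0))
      else max_cols
    (PySem.List.pyRange 0 max_cols 1).foldl (fun content_columns col =>
      let has_content := expanded_headers.any (fun header_row =>
        decide (col < (header_row.length : Int)) && pvCellContent (PySem.List.pyGetD header_row col ""))
      let has_content :=
        if !has_content then
          expanded_data_rows.any (fun data_row =>
            decide (col < (data_row.length : Int)) && pvCellContent (PySem.List.pyGetD data_row col ""))
        else has_content
      if has_content then content_columns ++ [col] else content_columns) []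

-- ===== PORT B =====
-- one row: add the index of every content cell to the set
def pvAddRow (s : PySem.Set Int) (row : List String) : PySem.Set Int :=
  (PySem.List.enumerate row 0).foldl (fun s p =>
    if pvCellContent p.2 then PySem.Set.add s p.1 else s) s

def identify_content_columns_py_alt (expanded_headers : List (List String)) (expanded_data_rows : List (List String)) : List Int :=
  let content : PySem.Set Int := expanded_headers.foldl pvAddRow PySem.Set.empty
  let content : PySem.Set Int := expanded_data_rows.foldl pvAddRow content
  PySem.List.sorted content (fun x => x) false

-- ===== PRECONDITION & SPEC =====
def Spec_identify_content_columns_py (expanded_headers : List (List String)) (expanded_data_rows : List (List String)) (out : List Int) : Prop := out = identify_content_columns_py_alt expanded_headers expanded_data_rows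
instance (expanded_headers : List (List String)) (expanded_data_rows : List (List String)) (out : List Int) : Decidable (Spec_identify_content_columns_py expanded_headers expanded_data_rows out) := by unfold Spec_identify_content_columns_py; infer_instance

-- ===== CLAIM (what is proved, stated in full; the proofs are below) =====
def Claim_equal_identify_content_columns_py : Prop := ∀ (expanded_headers : List (List String)) (expanded_data_rows : List (List String)), Dom_identify_content_columns_py expanded_headers expanded_data_rows → Spec_identify_content_columns_py expanded_headers expanded_data_rows (identify_content_columns_py expanded_headers expanded_data_rows)

-- ===== LEMMAS AND PROOFS =====

def pvAnyCol (rs : List (List String)) (col : Int) : Bool :=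
  rs.any (fun r => decide (col < (r.length : Int)) && pvCellContent (PySem.List.pyGetD r col ""))

def pvM (H D : List (List String)) : Int :=
  let m1 : Int := if H ≠ [] then max 0 (((PySem.List.max? (H.map (fun row => (row.length : Int))) (fun x => x)).getD 0)) else 0
  if D ≠ [] then max m1 (((PySem.List.max? (D.map (fun row => (row.length : Int))) (fun x => x)).getD 0)) else m1

def pvHas (rs : List (List String)) (i : Int) : Prop :=
  ∃ row ∈ rs, ∃ k : Nat, ∃ h : k < row.length, (k : Int) = i ∧ pvCellContent row[k] = true

theorem mem_foldl_addif (l : List (Int × String)) (s : PySem.Set Int) (i : Int) :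
    i ∈ l.foldl (fun s p => if pvCellContent p.2 then PySem.Set.add s p.1 else s) s ↔
      i ∈ s ∨ ∃ p ∈ l, pvCellContent p.2 = true ∧ p.1 = i := by
  induction l generalizing s with
  | nil => simp
  | cons p t ih =>
    simp only [List.foldl_cons, ih, List.mem_cons]
    split_ifs with hp
    · rw [PySem.Set.mem_add]
      constructor
      · rintro ((h | rfl) | ⟨q, hq, h1, h2⟩)
        · exact Or.inl h
        · exact Or.inr ⟨p, Or.inl rfl, hp, rfl⟩
        · exact Or.inr ⟨q, Or.inr hq, h1, h2⟩
      · rintro (h | ⟨q, (rfl | hq), h1, h2⟩)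
        · exact Or.inl (Or.inl h)
        · exact Or.inl (Or.inr h2.symm)
        · exact Or.inr ⟨q, hq, h1, h2⟩
    · constructor
      · rintro (h | ⟨q, hq, h1, h2⟩)
        · exact Or.inl h
        · exact Or.inr ⟨q, Or.inr hq, h1, h2⟩
      · rintro (h | ⟨q, (rfl | hq), h1, h2⟩)
        · exact Or.inl h
        · exact absurd h1 (by simp [hp])
        · exact Or.inr ⟨q, hq, h1, h2⟩

theorem nodup_foldl_addif (l : List (Int × String)) (s : PySem.Set Int) (h : s.Nodup) :
    (l.foldl (fun s p => if pvCellContent p.2 then PySem.Set.add s p.1 else s) s).Nodup := by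
  induction l generalizing s with
  | nil => exact h
  | cons p t ih =>
    simp only [List.foldl_cons]
    split_ifs with hp
    · exact ih _ (PySem.Set.nodup_add s p.1 h)
    · exact ih _ h

theorem mem_pvAddRow (s : PySem.Set Int) (row : List String) (i : Int) :
    i ∈ pvAddRow s row ↔ i ∈ s ∨ ∃ k : Nat, ∃ h : k < row.length, (k : Int) = i ∧ pvCellContent row[k] = true := by
  rw [pvAddRow, mem_foldl_addif]
  constructor
  · rintro (h | ⟨p, hp, h1, h2⟩)
    · exact Or.inl h
    · rw [PySem.List.mem_enumerate_iff] at hp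
      obtain ⟨k, hk, rfl⟩ := hp
      exact Or.inr ⟨k, hk, by simpa using h2, h1⟩
  · rintro (h | ⟨k, hk, h1, h2⟩)
    · exact Or.inl h
    · exact Or.inr ⟨((k : Int), row[k]), by rw [PySem.List.mem_enumerate_iff]; exact ⟨k, hk, by simp⟩, h2, h1⟩

theorem mem_foldl_pvAddRow (rs : List (List String)) (s : PySem.Set Int) (i : Int) :
    i ∈ rs.foldl pvAddRow s ↔ i ∈ s ∨ pvHas rs i := by
  induction rs generalizing s with
  | nil => simp [pvHas]
  | cons r t ih =>
    simp only [List.foldl_cons, ih, mem_pvAddRow, pvHas, List.mem_cons]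
    constructor
    · rintro ((h | ⟨k, hk, h1, h2⟩) | ⟨row, hr, hw⟩)
      · exact Or.inl h
      · exact Or.inr ⟨r, Or.inl rfl, k, hk, h1, h2⟩
      · exact Or.inr ⟨row, Or.inr hr, hw⟩
    · rintro (h | ⟨row, (rfl | hr), hw⟩)
      · exact Or.inl (Or.inl h)
      · exact Or.inl (Or.inr hw)
      · exact Or.inr ⟨row, hr, hw⟩

theorem nodup_foldl_pvAddRow (rs : List (List String)) (s : PySem.Set Int) (h : s.Nodup) :
    (rs.foldl pvAddRow s).Nodup := by
  induction rs generalizing s with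
  | nil => exact h
  | cons r t ih => exact ih _ (nodup_foldl_addif _ _ h)

theorem any_iff_pvHas (rs : List (List String)) (col : Int) (h0 : 0 ≤ col) :
    (rs.any (fun r => decide (col < (r.length : Int)) && pvCellContent (PySem.List.pyGetD r col "")) = true)
      ↔ pvHas rs col := by
  simp only [List.any_eq_true, Bool.and_eq_true, decide_eq_true_eq, pvHas]
  constructor
  · rintro ⟨r, hr, hlt, hc⟩
    refine ⟨r, hr, col.toNat, by omega, by omega, ?_⟩
    rwa [PySem.List.pyGetD_eq_getElem r "" h0 hlt] at hc
  · rintro ⟨r, hr, k, hk, rfl, hc⟩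
    refine ⟨r, hr, by exact_mod_cast hk, ?_⟩
    rw [PySem.List.pyGetD_eq_getElem r "" h0 (by exact_mod_cast hk)]
    simpa using hc

theorem max_term_bound (rs : List (List String)) (row : List String) (hr : row ∈ rs) :
    (row.length : Int) ≤ ((PySem.List.max? (rs.map (fun row => (row.length : Int))) (fun x => x)).getD 0) := by
  cases hm : PySem.List.max? (rs.map (fun row => (row.length : Int))) (fun x => x) with
  | none => rw [PySem.List.max?_eq_none_iff, List.map_eq_nil_iff] at hm; subst hm; simp at hr
  | some m =>
    have := PySem.List.max?_isMax hm (row.length : Int) (by simp; exact ⟨row, hr, rfl⟩)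
    simpa using this

theorem pvM_bound (H D : List (List String)) (row : List String) (hr : row ∈ H ++ D) :
    (row.length : Int) ≤ pvM H D := by
  unfold pvM
  rcases List.mem_append.1 hr with h | h
  · have h1 : H ≠ [] := by rintro rfl; simp at h
    have := max_term_bound H row h
    split_ifs <;> simp_all
  · have h1 : D ≠ [] := by rintro rfl; simp at h
    have := max_term_bound D row h
    split_ifs <;> simp_all

theorem portA_eq_filter (H D : List (List String)) (h : ¬(H = [] ∧ D = [])) :
    identify_content_columns_py H D
      = (PySem.List.pyRange 0 (pvM H D) 1).filter (fun col => pvAnyCol H col || pvAnyCol D col) := by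
  unfold identify_content_columns_py
  rw [if_neg h]
  show (PySem.List.pyRange 0 (pvM H D) 1).foldl _ [] = _
  rw [PySem.List.foldl_congr_mem _ _
      (fun (acc : List Int) (col : Int) => if (pvAnyCol H col || pvAnyCol D col) = true then acc ++ [col] else acc) _
      (by
        intro acc col _
        show (let has_content := pvAnyCol H col
              let has_content := if !has_content then pvAnyCol D col else has_content
              if has_content then acc ++ [col] else acc) = _
        cases hH : pvAnyCol H col <;> simp [hH])]
  rw [PySem.List.foldl_append_if_eq_filter]
  simp

theorem ports_agree (H D : List (List String)) :
    identify_content_columns_py H D = identify_content_columns_py_alt H D := by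
  by_cases he : H = [] ∧ D = []
  · obtain ⟨rfl, rfl⟩ := he
    rfl
  · rw [portA_eq_filter H D he]
    show _ = PySem.List.sorted (D.foldl pvAddRow (H.foldl pvAddRow PySem.Set.empty)) (fun x => x) false
    have hSnodup : (D.foldl pvAddRow (H.foldl pvAddRow PySem.Set.empty)).Nodup :=
      nodup_foldl_pvAddRow _ _ (nodup_foldl_pvAddRow _ _ List.nodup_nil)
    have hFnodup : ((PySem.List.pyRange 0 (pvM H D) 1).filter
        (fun col => pvAnyCol H col || pvAnyCol D col)).Nodup :=
      (PySem.List.nodup_pyRange_one 0 (pvM H D)).filter _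
    refine (PySem.List.sorted_eq_of_perm_of_pairwise_lt _ _ _ ?_ ?_).symm
    · rw [List.perm_ext_iff_of_nodup hFnodup hSnodup]
      intro a
      rw [List.mem_filter, PySem.List.mem_pyRange_one, mem_foldl_pvAddRow, mem_foldl_pvAddRow]
      simp only [List.not_mem_nil, false_or, Bool.or_eq_true, PySem.Set.empty]
      constructor
      · rintro ⟨⟨h0, _⟩, hp | hp⟩
        · exact Or.inl ((any_iff_pvHas H a h0).1 (by unfold pvAnyCol at hp; exact hp))
        · exact Or.inr ((any_iff_pvHas D a h0).1 (by unfold pvAnyCol at hp; exact hp))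
      · intro hh
        have hbound : 0 ≤ a ∧ a < pvM H D := by
          rcases hh with ⟨row, hr, k, hk, rfl, _⟩ | ⟨row, hr, k, hk, rfl, _⟩
          · have := pvM_bound H D row (List.mem_append.2 (Or.inl hr))
            constructor <;> [positivity; omega]
          · have := pvM_bound H D row (List.mem_append.2 (Or.inr hr))
            constructor <;> [positivity; omega]
        refine ⟨hbound, ?_⟩
        rcases hh with hp | hp
        · exact Or.inl ((any_iff_pvHas H a hbound.1).2 hp)
        · exact Or.inr ((any_iff_pvHas D a hbound.1).2 hp)
    · exact List.Pairwise.sublist List.filter_sublist (PySem.List.pairwise_lt_pyRange_one 0 (pvM H D))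

-- ===== VERDICT (by name: the statement is the Claim_ definition above) =====
theorem identify_content_columns_py_spec : Claim_equal_identify_content_columns_py := by
  intro H D _
  unfold Spec_identify_content_columns_py
  exact ports_agree H D
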